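-- pv_equiv track=rewrite | github.com/inmonim/algo | 프로그래머스/level3/징검다리.py | solution
-- ===== SOURCE A (Python) =====
-- def solution(stones, k):
--     answer = 0
--
--     # {가능회수 : [위치들]}로 일단 만듦
--     cnt_idxs = {}
--     for i in range(len(stones)):
--         if cnt_idxs.get(stones[i]):
--             cnt_idxs[stones[i]].append(i)
--         else:
--             cnt_idxs[stones[i]] = [i]
--
--     # 가능회수를 리스트로 오름차순 정렬
--     cnt_list = sorted(list(cnt_idxs.keys()))
--
--     # 죽은 징검다리를 set으로 모아둠
--     dead_set = set()
--
--     # 가능회수를 순회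
--     for c in cnt_list:
--
--         # 이번 턴에 죽은 애들 구하기
--         idxs = cnt_idxs[c]
--
--         dead_set.update(idxs)
--
--         # dead_set 길이가 k보다 작으면 절대 끝나지 않음
--         # 놀랍게도 이거 안 넣으면 시간 초과 꽤 남
--         if len(dead_set) < k:
--             continue
--
--         # 이번 턴에 죽은 돌의 위치부터 시작해서 연결이 끊긴 지점의 길이를 구함
--         # 시작점부터 +, - 따로 뻗어나가면서 총 끊긴 길이 구하기
--         for i in idxs:
--             i_p = i + 1
--             i_m = i - 1
--             tmp_cnt = 1
--             while i_p in dead_set: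
--                 tmp_cnt += 1
--                 i_p += 1
--             while i_m in dead_set:
--                 tmp_cnt += 1
--                 i_m -= 1
--
--             # 만약 k보다 길 경우,
--             # c번째로 징검다리를 건넌 사람까지만 통과하는 것이므로 c가 정답
--             if tmp_cnt >= k:
--                 answer = c
--                 return answer
-- ===== SOURCE B (Python) =====
-- def solution(stones, k):
--     # answer = the minimum over all length-k windows of the window maximum
--     # (the smallest stone value whose removal, with all smaller ones, opens a gap of k).
--     # Direct scan over window start positions; no dict / sort / dead-set.
--     best = None
--     for i in range(len(stones)):
--         if i + k > len(stones):
--             break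
--         m = stones[i]
--         for j in range(i + 1, i + k):
--             if stones[j] > m:
--                 m = stones[j]
--         if best is None or m < best:
--             best = m
--     return best
-- ===== Notes on version B (the rewrite author's own statement) =====
-- stated objective: simpler
-- what changed: Replaces A's value-grouping dict, sorted value sweep and incremental dead-set run expansion by a direct scan computing the minimum over all length-k windows of the window maximum.
-- outside the precondition, e.g. on solution([7], 2): A returns None, B returns None; on solution([], 1): A returns None, B returns None
import Mathlib
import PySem

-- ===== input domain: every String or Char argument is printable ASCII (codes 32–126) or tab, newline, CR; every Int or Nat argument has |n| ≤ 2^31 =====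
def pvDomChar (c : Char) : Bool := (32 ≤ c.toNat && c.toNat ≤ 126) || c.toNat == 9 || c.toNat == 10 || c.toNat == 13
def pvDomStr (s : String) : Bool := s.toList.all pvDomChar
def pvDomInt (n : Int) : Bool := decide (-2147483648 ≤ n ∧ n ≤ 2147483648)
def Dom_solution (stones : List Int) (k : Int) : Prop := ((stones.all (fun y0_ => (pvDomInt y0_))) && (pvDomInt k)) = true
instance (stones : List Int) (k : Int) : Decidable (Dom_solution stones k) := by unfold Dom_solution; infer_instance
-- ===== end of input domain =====

-- B replaces A's value-grouping dict + sorted value sweep + incremental dead-set run expansion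
-- by a direct min-over-windows-of-window-max scan; objective: simpler (not claimed faster).

-- ===== PORT A =====
-- dict-building loop body: group index i under value stones[i]
def pvBuildStep (stones : List Int) (d : PySem.Dict Int (List Int)) (i : Int) :
    PySem.Dict Int (List Int) :=
  let v := PySem.List.pyGetD stones i 0
  match PySem.Dict.get? d v with
  | some l => if l.isEmpty then PySem.Dict.insert d v [i]      -- falsy get → new singleton (unreachable: stored lists are nonempty)
              else PySem.Dict.insert d v (l ++ [i])            -- truthy get → append
  | none => PySem.Dict.insert d v [i]

-- for i in range(len(stones)): …
def pvBuildDict (stones : List Int) : PySem.Dict Int (List Int) :=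
  (PySem.List.pyRange 0 stones.length 1).foldl (pvBuildStep stones) PySem.Dict.empty

-- while i_p in dead_set: tmp_cnt += 1; i_p += 1   (fuel = |dead_set| always suffices: the visited members are distinct)
def pvCountUp (dead : List Int) : Nat → Int → Int
  | 0, _ => 0
  | fuel + 1, i => if i ∈ dead then 1 + pvCountUp dead fuel (i + 1) else 0

def pvCountDown (dead : List Int) : Nat → Int → Int
  | 0, _ => 0
  | fuel + 1, i => if i ∈ dead then 1 + pvCountDown dead fuel (i - 1) else 0

-- for i in idxs: … if tmp_cnt >= k: return  (early return = any)
def pvInnerScan (k : Int) (dead : PySem.Set Int) (idxs : List Int) : Bool :=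
  idxs.any (fun i =>
    decide (1 + pvCountUp dead dead.length (i + 1) + pvCountDown dead dead.length (i - 1) ≥ k))

-- for c in cnt_list: …  (early return as Option)
def pvMainLoop (k : Int) (d : PySem.Dict Int (List Int)) :
    List Int → PySem.Set Int → Option Int
  | [], _ => none
  | c :: rest, dead =>
    let idxs := PySem.Dict.getD d c []
    let dead' := PySem.Set.update dead idxs
    if dead'.length < k then pvMainLoop k d rest dead'
    else if pvInnerScan k dead' idxs then some c
    else pvMainLoop k d rest dead'

def solution (stones : List Int) (k : Int) : Int :=
  let cnt_idxs := pvBuildDict stones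
  let cnt_list := PySem.List.sorted (PySem.Dict.keys cnt_idxs) (fun x => x) false
  match pvMainLoop k cnt_idxs cnt_list PySem.Set.empty with
  | some a => a
  | none => 0        -- Python falls through and returns None here; excluded by Pre_solution

-- ===== PORT B =====
-- for i in range(len(stones)): if i + k > len(stones): break; …  (break = early return of best)
def solution_alt_loop (stones : List Int) (k : Int) : List Int → Option Int → Option Int
  | [], best => best
  | i :: rest, best =>
    if i + k > stones.length then best
    else
      let m := (PySem.List.pyRange (i + 1) (i + k) 1).foldl
        (fun m j => if PySem.List.pyGetD stones j 0 > m then PySem.List.pyGetD stones j 0 else m)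
        (PySem.List.pyGetD stones i 0)
      solution_alt_loop stones k rest (match best with
        | none => some m
        | some b => if m < b then some m else some b)

def solution_alt (stones : List Int) (k : Int) : Int :=
  (solution_alt_loop stones k (PySem.List.pyRange 0 stones.length 1) none).getD 0
  -- Python returns best, which is None only outside Pre_solution

-- ===== PRECONDITION & SPEC =====
-- Pre_ excludes exactly the inputs (empty stones, or k > len(stones)) on which A falls through
-- its loop and returns None, which is not an int.
def Pre_solution (stones : List Int) (k : Int) : Prop :=
  stones ≠ [] ∧ k ≤ (stones.length : Int)
instance (stones : List Int) (k : Int) : Decidable (Pre_solution stones k) := by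
  unfold Pre_solution; infer_instance

def pvWitness_solution : List Int × Int := ([2, 4, 5, 3, 2, 1, 4, 2, 5, 1], 3)

def Spec_solution (stones : List Int) (k : Int) (out : Int) : Prop := out = solution_alt stones k
instance (stones : List Int) (k : Int) (out : Int) : Decidable (Spec_solution stones k out) := by
  unfold Spec_solution; infer_instance

-- ===== CLAIM (what is proved, stated in full; the proofs are below) =====
def Claim_equal_solution : Prop := ∀ (stones : List Int) (k : Int), Dom_solution stones k → Pre_solution stones k → Spec_solution stones k (solution stones k)

-- ===== LEMMAS AND PROOFS =====

-- stones[j] as an Int-indexed total lookup (only used at 0 ≤ j < len)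
def pvG (stones : List Int) (j : Int) : Int := PySem.List.pyGetD stones j 0

-- maximum of the window stones[a .. a+k)
def pvWMax (stones : List Int) (k a : Int) : Int :=
  (PySem.List.pyRange (a + 1) (a + k) 1).foldl
    (fun acc j => max acc (pvG stones j)) (pvG stones a)

-- "person v can be blocked": some window of k consecutive stones has all values ≤ v
def pvGood (stones : List Int) (k v : Int) : Prop :=
  ∃ a : Int, 0 ≤ a ∧ a + k ≤ (stones.length : Int) ∧
    ∀ j : Int, a ≤ j → j < a + k → pvG stones j ≤ v

-- the common characterisation of both programs' result
def pvIsAns (stones : List Int) (k c : Int) : Prop :=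
  c ∈ stones ∧ pvGood stones k c ∧ ∀ v, v ∈ stones → pvGood stones k v → c ≤ v

lemma pvG_mem (stones : List Int) (j : Int) (h0 : 0 ≤ j) (h1 : j < (stones.length : Int)) :
    pvG stones j ∈ stones := by
  apply PySem.List.pyGetD_mem
  simp [PySem.Raise.InRange]
  omega

lemma pvG_exists_iff_mem (stones : List Int) (c : Int) :
    (∃ x : Int, 0 ≤ x ∧ x < (stones.length : Int) ∧ pvG stones x = c) ↔ c ∈ stones := by
  constructor
  · rintro ⟨x, h1, h2, h3⟩
    rw [← h3]
    exact pvG_mem stones x h1 h2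
  · intro h
    obtain ⟨i, hi, he⟩ := List.mem_iff_getElem.mp h
    refine ⟨(i : Int), by omega, by omega, ?_⟩
    unfold pvG
    rw [PySem.List.pyGetD_natCast, List.getD_eq_getElem stones 0 hi, he]

lemma pvWMax_ub (stones : List Int) (k a : Int) :
    ∀ j : Int, a ≤ j → j < a + k → pvG stones j ≤ pvWMax stones k a := by
  intro j hj1 hj2
  unfold pvWMax
  obtain ⟨h1, h2⟩ := PySem.List.le_foldl_max_int (PySem.List.pyRange (a + 1) (a + k) 1)
    (pvG stones) (pvG stones a)
  rcases eq_or_lt_of_le hj1 with h | h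
  · rw [← h]; exact h1
  · exact h2 j (by rw [PySem.List.mem_pyRange_one]; omega)

lemma pvWMax_window (stones : List Int) (k a : Int) (hk : 1 ≤ k) :
    ∃ i : Int, a ≤ i ∧ i < a + k ∧ pvWMax stones k a = pvG stones i := by
  unfold pvWMax
  rw [show (fun acc j => max acc (pvG stones j)) = (fun (x : Int) (y : Int) => max x (pvG stones y)) from rfl]
  rw [← List.foldl_map (f := pvG stones) (g := max)]
  rcases PySem.List.foldl_max_mem ((PySem.List.pyRange (a + 1) (a + k) 1).map (pvG stones))
      (pvG stones a) with h | h
  · exact ⟨a, le_refl a, by omega, h⟩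
  · obtain ⟨j, hj, hje⟩ := List.mem_map.mp h
    rw [PySem.List.mem_pyRange_one] at hj
    exact ⟨j, by omega, by omega, hje.symm⟩

lemma pvWMax_good (stones : List Int) (k a : Int) (ha : 0 ≤ a)
    (han : a + k ≤ (stones.length : Int)) : pvGood stones k (pvWMax stones k a) :=
  ⟨a, ha, han, pvWMax_ub stones k a⟩

lemma pvWMax_mem_stones (stones : List Int) (k a : Int) (hk : 1 ≤ k) (ha : 0 ≤ a)
    (han : a + k ≤ (stones.length : Int)) : pvWMax stones k a ∈ stones := by
  obtain ⟨i, h1, h2, h3⟩ := pvWMax_window stones k a hk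
  rw [h3]
  exact pvG_mem stones i (by omega) (by omega)

lemma pvWMax_le_of_window_le (stones : List Int) (k a v : Int) (hk : 1 ≤ k)
    (hv : ∀ j : Int, a ≤ j → j < a + k → pvG stones j ≤ v) : pvWMax stones k a ≤ v := by
  obtain ⟨i, h1, h2, h3⟩ := pvWMax_window stones k a hk
  rw [h3]
  exact hv i h1 h2

-- the minimal blocked person's value is attained INSIDE its window
lemma pvIsAns_hit (stones : List Int) (k c : Int) (hk : 1 ≤ k) (hans : pvIsAns stones k c) :
    ∃ a : Int, 0 ≤ a ∧ a + k ≤ (stones.length : Int) ∧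
      (∀ j : Int, a ≤ j → j < a + k → pvG stones j ≤ c) ∧
      ∃ i : Int, a ≤ i ∧ i < a + k ∧ pvG stones i = c := by
  obtain ⟨a, ha, han, hv⟩ := hans.2.1
  have hm_le : pvWMax stones k a ≤ c := pvWMax_le_of_window_le stones k a c hk hv
  have hm_good : pvGood stones k (pvWMax stones k a) := pvWMax_good stones k a ha han
  have hm_mem : pvWMax stones k a ∈ stones := pvWMax_mem_stones stones k a hk ha han
  have hc_le : c ≤ pvWMax stones k a := hans.2.2 _ hm_mem hm_good
  have heq : pvWMax stones k a = c := le_antisymm hm_le hc_le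
  obtain ⟨i, h1, h2, h3⟩ := pvWMax_window stones k a hk
  refine ⟨a, ha, han, ?_, i, h1, h2, by rw [← h3, heq]⟩
  intro j hj1 hj2
  exact le_trans (pvWMax_ub stones k a j hj1 hj2) (le_of_eq heq)

-- ---- B side ----

lemma pvAlt_inner (stones : List Int) (k i : Int) :
    (PySem.List.pyRange (i + 1) (i + k) 1).foldl
      (fun m j => if PySem.List.pyGetD stones j 0 > m then PySem.List.pyGetD stones j 0 else m)
      (PySem.List.pyGetD stones i 0) = pvWMax stones k i := by
  unfold pvWMax pvG
  apply PySem.List.foldl_congr_mem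
  intro acc x _
  by_cases h : PySem.List.pyGetD stones x 0 > acc
  · simp [h, max_eq_right h.le]
  · simp [h, max_eq_left (not_lt.mp h)]

lemma pvFoldOptMin (f : Int → Int) (l : List Int) (b : Int) :
    l.foldl (fun best i => match best with
      | none => some (f i)
      | some b => if f i < b then some (f i) else some b) (some b)
    = some (l.foldl (fun acc i => min acc (f i)) b) := by
  induction l generalizing b with
  | nil => simp
  | cons i l ih =>
    simp only [List.foldl_cons]
    have hstep : (if f i < b then some (f i) else some b) = some (min b (f i)) := by
      by_cases h : f i < b
      · simp [h, min_eq_right h.le]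
      · simp [h, min_eq_left (not_lt.mp h)]
    rw [hstep, ih]

lemma pvAltLoop_fold_append (stones : List Int) (k : Int) :
    ∀ (l1 l2 : List Int) (best : Option Int),
      (∀ i ∈ l1, ¬ (i + k > (stones.length : Int))) →
      solution_alt_loop stones k (l1 ++ l2) best =
        solution_alt_loop stones k l2 (l1.foldl (fun best i => match best with
          | none => some (pvWMax stones k i)
          | some b => if pvWMax stones k i < b then some (pvWMax stones k i) else some b) best) := by
  intro l1
  induction l1 with
  | nil => intro l2 best _; rfl
  | cons i l1 ih =>
    intro l2 best hnb
    rw [List.cons_append]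
    show (if i + k > (stones.length : Int) then best else _) = _
    rw [if_neg (hnb i List.mem_cons_self)]
    simp only [pvAlt_inner, List.foldl_cons]
    exact ih l2 _ (fun x hx => hnb x (List.mem_cons_of_mem i hx))

lemma pvAltLoop_tail (stones : List Int) (k : Int) (best : Option Int)
    (hk1 : 1 ≤ k) (hk2 : k ≤ (stones.length : Int)) :
    solution_alt_loop stones k
      (PySem.List.pyRange ((stones.length : Int) - k + 1) (stones.length : Int) 1) best = best := by
  by_cases h : (stones.length : Int) - k + 1 < (stones.length : Int)
  · rw [PySem.List.pyRange_one_cons h]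
    show (if (stones.length : Int) - k + 1 + k > (stones.length : Int) then best else _) = best
    rw [if_pos (by omega)]
  · rw [PySem.List.pyRange_one_eq_nil (by omega)]
    rfl

lemma pvAlt_eq (stones : List Int) (k : Int) (hk1 : 1 ≤ k) (hk2 : k ≤ (stones.length : Int)) :
    solution_alt stones k =
      (PySem.List.pyRange 1 ((stones.length : Int) - k + 1) 1).foldl
        (fun acc i => min acc (pvWMax stones k i)) (pvWMax stones k 0) := by
  unfold solution_alt
  rw [PySem.List.pyRange_one_append 0 ((stones.length : Int) - k + 1) (stones.length : Int)
    (by omega) (by omega)]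
  rw [pvAltLoop_fold_append stones k _ _ none
    (by intro i hi; rw [PySem.List.mem_pyRange_one] at hi; omega)]
  rw [pvAltLoop_tail stones k _ hk1 hk2]
  rw [PySem.List.pyRange_one_cons (by omega : (0:Int) < (stones.length : Int) - k + 1)]
  simp only [List.foldl_cons]
  rw [pvFoldOptMin (fun i => pvWMax stones k i)]
  simp

lemma pvWMax_nonpos (stones : List Int) (k i : Int) (hk : k ≤ 0) :
    pvWMax stones k i = pvG stones i := by
  unfold pvWMax
  rw [PySem.List.pyRange_one_eq_nil (by omega)]
  rfl

lemma pvAlt_eq0 (stones : List Int) (k : Int) (hk : k ≤ 0) (hne : stones ≠ []) :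
    solution_alt stones k =
      (PySem.List.pyRange 1 (stones.length : Int) 1).foldl
        (fun acc i => min acc (pvG stones i)) (pvG stones 0) := by
  have hn : 1 ≤ (stones.length : Int) := by
    have := List.length_pos_iff.mpr hne; omega
  unfold solution_alt
  rw [show PySem.List.pyRange 0 (stones.length : Int) 1
      = PySem.List.pyRange 0 (stones.length : Int) 1 ++ [] from (List.append_nil _).symm]
  rw [pvAltLoop_fold_append stones k _ _ none
    (by intro i hi; rw [PySem.List.mem_pyRange_one] at hi; omega)]
  show ((PySem.List.pyRange 0 (stones.length : Int) 1).foldl _ none).getD 0 = _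
  rw [PySem.List.pyRange_one_cons (by omega : (0:Int) < (stones.length : Int))]
  simp only [List.foldl_cons]
  rw [pvFoldOptMin (fun i => pvWMax stones k i)]
  simp only [Option.getD_some, pvWMax_nonpos stones k _ hk]
  norm_num

lemma pvL_B (stones : List Int) (k : Int) (hk1 : 1 ≤ k) (hk2 : k ≤ (stones.length : Int)) :
    pvIsAns stones k (solution_alt stones k) := by
  rw [pvAlt_eq stones k hk1 hk2,
    ← List.foldl_map (f := pvWMax stones k) (g := min)
      (l := PySem.List.pyRange 1 ((stones.length : Int) - k + 1) 1)
      (init := pvWMax stones k 0)]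
  obtain ⟨h1, h2⟩ := PySem.List.foldl_min_le
    ((PySem.List.pyRange 1 ((stones.length : Int) - k + 1) 1).map (pvWMax stones k))
    (pvWMax stones k 0)
  have hle : ∀ a : Int, 0 ≤ a → a + k ≤ (stones.length : Int) →
      ((PySem.List.pyRange 1 ((stones.length : Int) - k + 1) 1).map (pvWMax stones k)).foldl min
        (pvWMax stones k 0) ≤ pvWMax stones k a := by
    intro a ha han
    rcases eq_or_lt_of_le ha with h | h
    · rw [← h]; exact h1
    · exact h2 _ (List.mem_map.mpr ⟨a, by rw [PySem.List.mem_pyRange_one]; omega, rfl⟩)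
  have hex : ∃ a : Int, 0 ≤ a ∧ a + k ≤ (stones.length : Int) ∧
      ((PySem.List.pyRange 1 ((stones.length : Int) - k + 1) 1).map (pvWMax stones k)).foldl min
        (pvWMax stones k 0) = pvWMax stones k a := by
    rcases PySem.List.foldl_min_mem
      ((PySem.List.pyRange 1 ((stones.length : Int) - k + 1) 1).map (pvWMax stones k))
      (pvWMax stones k 0) with h | h
    · exact ⟨0, le_refl 0, by omega, h⟩
    · obtain ⟨a, hal, hae⟩ := List.mem_map.mp h
      rw [PySem.List.mem_pyRange_one] at hal
      exact ⟨a, by omega, by omega, hae.symm⟩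
  obtain ⟨a0, ha0, han0, hreq⟩ := hex
  rw [hreq]
  refine ⟨pvWMax_mem_stones stones k a0 hk1 ha0 han0, pvWMax_good stones k a0 ha0 han0, ?_⟩
  intro v _ hgood
  obtain ⟨a, ha, han, hv⟩ := hgood
  rw [← hreq]
  exact le_trans (hle a ha han) (pvWMax_le_of_window_le stones k a v hk1 hv)

lemma pvL_B0 (stones : List Int) (k : Int) (hk : k ≤ 0) (hne : stones ≠ []) :
    pvIsAns stones k (solution_alt stones k) := by
  have hn : 1 ≤ (stones.length : Int) := by
    have := List.length_pos_iff.mpr hne; omega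
  rw [pvAlt_eq0 stones k hk hne,
    ← List.foldl_map (f := pvG stones) (g := min)
      (l := PySem.List.pyRange 1 (stones.length : Int) 1) (init := pvG stones 0)]
  have hle : ∀ a : Int, 0 ≤ a → a < (stones.length : Int) →
      ((PySem.List.pyRange 1 (stones.length : Int) 1).map (pvG stones)).foldl min
        (pvG stones 0) ≤ pvG stones a := by
    intro a ha han
    obtain ⟨h1, h2⟩ := PySem.List.foldl_min_le
      ((PySem.List.pyRange 1 (stones.length : Int) 1).map (pvG stones)) (pvG stones 0)
    rcases eq_or_lt_of_le ha with h | h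
    · rw [← h]; exact h1
    · exact h2 _ (List.mem_map.mpr ⟨a, by rw [PySem.List.mem_pyRange_one]; omega, rfl⟩)
  have hex : ∃ a : Int, 0 ≤ a ∧ a < (stones.length : Int) ∧
      ((PySem.List.pyRange 1 (stones.length : Int) 1).map (pvG stones)).foldl min
        (pvG stones 0) = pvG stones a := by
    rcases PySem.List.foldl_min_mem
      ((PySem.List.pyRange 1 (stones.length : Int) 1).map (pvG stones)) (pvG stones 0) with h | h
    · exact ⟨0, le_refl 0, by omega, h⟩
    · obtain ⟨a, hal, hae⟩ := List.mem_map.mp h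
      rw [PySem.List.mem_pyRange_one] at hal
      exact ⟨a, by omega, by omega, hae.symm⟩
  obtain ⟨a0, ha0, han0, hreq⟩ := hex
  rw [hreq]
  refine ⟨pvG_mem stones a0 ha0 han0, ⟨0, le_refl 0, by omega,
    by intro j hj1 hj2; exfalso; omega⟩, ?_⟩
  intro v hv _
  obtain ⟨x, hx0, hxn, hxv⟩ := (pvG_exists_iff_mem stones v).mpr hv
  rw [← hreq, ← hxv]
  exact hle x hx0 hxn

-- ---- A side: countUp / countDown ----

lemma pvCountUp_nonneg (D : List Int) : ∀ (fuel : Nat) (i : Int), 0 ≤ pvCountUp D fuel i := by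
  intro fuel
  induction fuel with
  | zero => intro i; simp [pvCountUp]
  | succ n ih =>
    intro i
    simp only [pvCountUp]
    split_ifs with h
    · have := ih (i + 1); omega
    · omega

lemma pvCountDown_nonneg (D : List Int) : ∀ (fuel : Nat) (i : Int), 0 ≤ pvCountDown D fuel i := by
  intro fuel
  induction fuel with
  | zero => intro i; simp [pvCountDown]
  | succ n ih =>
    intro i
    simp only [pvCountDown]
    split_ifs with h
    · have := ih (i - 1); omega
    · omega

lemma pvCountUp_mem (D : List Int) : ∀ (fuel : Nat) (i t : Int), 0 ≤ t →
    t < pvCountUp D fuel i → i + t ∈ D := by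
  intro fuel
  induction fuel with
  | zero => intro i t h0 h1; simp [pvCountUp] at h1; omega
  | succ n ih =>
    intro i t h0 h1
    simp only [pvCountUp] at h1
    split_ifs at h1 with hmem
    · rcases eq_or_lt_of_le h0 with h | h
      · rw [← h]; simpa using hmem
      · have := ih (i + 1) (t - 1) (by omega) (by omega)
        have : i + 1 + (t - 1) = i + t := by ring
        rw [← this]
        exact ih (i + 1) (t - 1) (by omega) (by omega)
    · omega

lemma pvCountDown_mem (D : List Int) : ∀ (fuel : Nat) (i t : Int), 0 ≤ t →
    t < pvCountDown D fuel i → i - t ∈ D := by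
  intro fuel
  induction fuel with
  | zero => intro i t h0 h1; simp [pvCountDown] at h1; omega
  | succ n ih =>
    intro i t h0 h1
    simp only [pvCountDown] at h1
    split_ifs at h1 with hmem
    · rcases eq_or_lt_of_le h0 with h | h
      · rw [← h]; simpa using hmem
      · have heq : i - 1 - (t - 1) = i - t := by ring
        rw [← heq]
        exact ih (i - 1) (t - 1) (by omega) (by omega)
    · omega

lemma pvCountUp_ge (D : List Int) : ∀ (fuel : Nat) (t : Nat) (i : Int), t ≤ fuel →
    (∀ s : Int, 0 ≤ s → s < t → i + s ∈ D) → (t : Int) ≤ pvCountUp D fuel i := by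
  intro fuel
  induction fuel with
  | zero => intro t i ht _; interval_cases t; simp [pvCountUp]
  | succ n ih =>
    intro t i ht hall
    match t with
    | 0 => exact Int.natCast_zero ▸ pvCountUp_nonneg D (n + 1) i
    | Nat.succ t' =>
      have hmem : i ∈ D := by have := hall 0 (le_refl 0) (by exact_mod_cast Nat.succ_pos t'); simpa using this
      simp only [pvCountUp, if_pos hmem]
      have := ih t' (i + 1) (by omega) (fun s hs1 hs2 => by
        have := hall (s + 1) (by omega) (by push_cast; omega)
        have heq : i + (s + 1) = i + 1 + s := by ring
        rwa [heq] at this)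
      push_cast
      omega

lemma pvCountDown_ge (D : List Int) : ∀ (fuel : Nat) (t : Nat) (i : Int), t ≤ fuel →
    (∀ s : Int, 0 ≤ s → s < t → i - s ∈ D) → (t : Int) ≤ pvCountDown D fuel i := by
  intro fuel
  induction fuel with
  | zero => intro t i ht _; interval_cases t; simp [pvCountDown]
  | succ n ih =>
    intro t i ht hall
    match t with
    | 0 => exact Int.natCast_zero ▸ pvCountDown_nonneg D (n + 1) i
    | Nat.succ t' =>
      have hmem : i ∈ D := by have := hall 0 (le_refl 0) (by exact_mod_cast Nat.succ_pos t'); simpa using this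
      simp only [pvCountDown, if_pos hmem]
      have := ih t' (i - 1) (by omega) (fun s hs1 hs2 => by
        have := hall (s + 1) (by omega) (by push_cast; omega)
        have heq : i - (s + 1) = i - 1 - s := by ring
        rwa [heq] at this)
      push_cast
      omega

-- t consecutive integers inside a duplicate-free list bound its length
lemma pvRun_le_length (D : List Int) (hnd : D.Nodup) (i : Int) (t : Nat)
    (h : ∀ s : Int, 0 ≤ s → s < t → i + s ∈ D) : t ≤ D.length := by
  have hsub : PySem.List.pyRange i (i + t) 1 ⊆ D := by
    intro x hx
    rw [PySem.List.mem_pyRange_one] at hx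
    have := h (x - i) (by omega) (by omega)
    have heq : i + (x - i) = x := by ring
    rwa [heq] at this
  have hlen := (List.subperm_of_subset (PySem.List.nodup_pyRange_one i (i + t)) hsub).length_le
  rw [PySem.List.length_pyRange_one] at hlen
  omega

-- a successful inner scan exhibits a blocked window
lemma pvScan_found (stones : List Int) (k c : Int) (hk : 1 ≤ k) (D idxs : List Int)
    (hD : ∀ x ∈ D, 0 ≤ x ∧ x < (stones.length : Int) ∧ pvG stones x ≤ c)
    (hidx : ∀ i ∈ idxs, i ∈ D)
    (h : pvInnerScan k D idxs = true) : pvGood stones k c := by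
  unfold pvInnerScan at h
  rw [List.any_eq_true] at h
  obtain ⟨i, hi, hcond⟩ := h
  rw [decide_eq_true_eq] at hcond
  set u := pvCountUp D D.length (i + 1) with hu
  set dn := pvCountDown D D.length (i - 1) with hdn
  have hmem : ∀ t : Int, -dn ≤ t → t ≤ u → i + t ∈ D := by
    intro t h1 h2
    rcases lt_trichotomy t 0 with h | h | h
    · have := pvCountDown_mem D D.length (i - 1) (-t - 1) (by omega) (by omega)
      have heq : i - 1 - (-t - 1) = i + t := by ring
      rwa [heq] at this
    · rw [h, add_zero]; exact hidx i hi
    · have := pvCountUp_mem D D.length (i + 1) (t - 1) (by omega) (by omega)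
      have heq : i + 1 + (t - 1) = i + t := by ring
      rwa [heq] at this
  have hu0 : 0 ≤ u := pvCountUp_nonneg D D.length (i + 1)
  have hdn0 : 0 ≤ dn := pvCountDown_nonneg D D.length (i - 1)
  refine ⟨i - dn, ?_, ?_, ?_⟩
  · exact (hD (i - dn) (by have := hmem (-dn) (le_refl _) (by omega); simpa using this)).1
  · have hlast : i - dn + k - 1 ∈ D := by
      have := hmem (k - 1 - dn) (by omega) (by omega)
      have heq : i + (k - 1 - dn) = i - dn + k - 1 := by ring
      rwa [heq] at this
    have := (hD _ hlast).2.1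
    omega
  · intro j hj1 hj2
    have hjD : j ∈ D := by
      have := hmem (j - i) (by omega) (by omega)
      have heq : i + (j - i) = j := by ring
      rwa [heq] at this
    exact (hD j hjD).2.2

-- a dead window containing a scanned index makes the scan succeed
lemma pvScan_hit (k : Int) (D idxs : List Int) (hnd : D.Nodup) (a : Int)
    (hwin : ∀ j : Int, a ≤ j → j < a + k → j ∈ D)
    (i : Int) (hi : i ∈ idxs) (hia : a ≤ i) (hik : i < a + k) (hk : 1 ≤ k) :
    pvInnerScan k D idxs = true := by
  unfold pvInnerScan
  rw [List.any_eq_true]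
  refine ⟨i, hi, ?_⟩
  rw [decide_eq_true_eq]
  have hup : (a + k - 1 - i : Int) ≤ pvCountUp D D.length (i + 1) := by
    have hcast : ((a + k - 1 - i).toNat : Int) = a + k - 1 - i := by omega
    rw [← hcast]
    apply pvCountUp_ge D D.length
    · apply pvRun_le_length D hnd (i + 1)
      intro s hs1 hs2
      exact hwin (i + 1 + s) (by omega) (by omega)
    · intro s hs1 hs2
      exact hwin (i + 1 + s) (by omega) (by omega)
  have hdown : (i - a : Int) ≤ pvCountDown D D.length (i - 1) := by
    have hcast : ((i - a).toNat : Int) = i - a := by omega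
    rw [← hcast]
    apply pvCountDown_ge D D.length
    · apply pvRun_le_length D hnd a
      intro s hs1 hs2
      exact hwin (a + s) (by omega) (by omega)
    · intro s hs1 hs2
      exact hwin (i - 1 - s) (by omega) (by omega)
  omega

-- ---- A side: the dict ----

lemma pvBuild_inv (stones : List Int) : ∀ m : Nat, m ≤ stones.length →
    (∀ c l, ((PySem.List.pyRange 0 (m : Int) 1).foldl (pvBuildStep stones) PySem.Dict.empty).get? c = some l → l ≠ []) ∧
    (∀ c x, x ∈ ((PySem.List.pyRange 0 (m : Int) 1).foldl (pvBuildStep stones) PySem.Dict.empty).getD c [] ↔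
      (0 ≤ x ∧ x < (m : Int) ∧ pvG stones x = c)) ∧
    ((PySem.List.pyRange 0 (m : Int) 1).foldl (pvBuildStep stones) PySem.Dict.empty).keys.Nodup ∧
    (∀ c, c ∈ ((PySem.List.pyRange 0 (m : Int) 1).foldl (pvBuildStep stones) PySem.Dict.empty).keys ↔
      ∃ x : Int, 0 ≤ x ∧ x < (m : Int) ∧ pvG stones x = c) := by
  intro m
  induction m with
  | zero =>
    intro _
    rw [show ((0:Nat) : Int) = 0 from rfl, PySem.List.pyRange_one_eq_nil (le_refl 0)]
    simp only [List.foldl_nil]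
    refine ⟨?_, ?_, ?_, ?_⟩
    · intro c l h; rw [PySem.Dict.get?_empty] at h; exact absurd h (by simp)
    · intro c x; rw [PySem.Dict.getD_empty]; simp; omega
    · rw [PySem.Dict.keys_empty]; exact List.nodup_nil
    · intro c; rw [PySem.Dict.keys_empty]; simp; omega
  | succ m ih =>
    intro hm
    obtain ⟨J, H, N, Kc⟩ := ih (by omega)
    have hsplit : PySem.List.pyRange 0 ((m + 1 : Nat) : Int) 1
        = PySem.List.pyRange 0 (m : Int) 1 ++ [(m : Int)] := by
      push_cast
      exact PySem.List.pyRange_one_succ_right (by omega)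
    rw [hsplit, List.foldl_append, List.foldl_cons, List.foldl_nil]
    set dm := (PySem.List.pyRange 0 (m : Int) 1).foldl (pvBuildStep stones) PySem.Dict.empty with hdm
    set v := PySem.List.pyGetD stones (m : Int) 0 with hv
    have hstep : pvBuildStep stones dm (m : Int) = dm.insert v (dm.getD v [] ++ [(m : Int)]) := by
      unfold pvBuildStep
      cases hget : dm.get? v with
      | none =>
        rw [PySem.Dict.getD_of_get?_eq_none _ ([] : List Int) hget]
        simp only [← hv, hget]
        simp
      | some l =>
        have hne := J v l hget
        rw [PySem.Dict.getD_of_get?_eq_some _ ([] : List Int) hget]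
        simp only [← hv, hget]
        simp [List.isEmpty_iff, hne]
    rw [hstep]
    have hvG : pvG stones (m : Int) = v := rfl
    refine ⟨?_, ?_, ?_, ?_⟩
    · intro c l h
      rw [PySem.Dict.get?_insert] at h
      split_ifs at h with hc
      · cases h; simp
      · exact J c l h
    · intro c x
      rw [PySem.Dict.getD_insert]
      split_ifs with hc
      · subst hc
        rw [List.mem_append, List.mem_singleton, H]
        constructor
        · rintro (⟨h1, h2, h3⟩ | h)
          · exact ⟨h1, by push_cast; omega, h3⟩
          · subst h; exact ⟨by omega, by push_cast; omega, hvG⟩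
        · rintro ⟨h1, h2, h3⟩
          by_cases hx : x < (m : Int)
          · exact Or.inl ⟨h1, hx, h3⟩
          · right; push_cast at h2; omega
      · rw [H]
        constructor
        · rintro ⟨h1, h2, h3⟩; exact ⟨h1, by push_cast; omega, h3⟩
        · rintro ⟨h1, h2, h3⟩
          refine ⟨h1, ?_, h3⟩
          by_cases hx : x < (m : Int)
          · exact hx
          · exfalso; apply hc; rw [← h3]; push_cast at h2
            have : x = (m : Int) := by omega
            rw [this]; exact hvG.symm
    · exact PySem.Dict.nodup_keys_insert _ _ _ N
    · intro c
      rw [PySem.Dict.mem_keys_insert, Kc]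
      constructor
      · rintro (h | ⟨x, h1, h2, h3⟩)
        · exact ⟨(m : Int), by omega, by push_cast; omega, by rw [h]; exact hvG⟩
        · exact ⟨x, h1, by push_cast; omega, h3⟩
      · rintro ⟨x, h1, h2, h3⟩
        by_cases hx : x < (m : Int)
        · exact Or.inr ⟨x, h1, hx, h3⟩
        · left; push_cast at h2
          have : x = (m : Int) := by omega
          rw [← h3, this]; exact hvG.symm

lemma pvBuildDict_getD (stones : List Int) (c x : Int) :
    x ∈ (pvBuildDict stones).getD c [] ↔
      (0 ≤ x ∧ x < (stones.length : Int) ∧ pvG stones x = c) := by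
  have := (pvBuild_inv stones stones.length (le_refl _)).2.1 c x
  unfold pvBuildDict
  exact this

lemma pvCntList_mem (stones : List Int) (v : Int) :
    v ∈ PySem.List.sorted (PySem.Dict.keys (pvBuildDict stones)) (fun x => x) false ↔
      v ∈ stones := by
  rw [PySem.List.mem_sorted]
  unfold pvBuildDict
  rw [(pvBuild_inv stones stones.length (le_refl _)).2.2.2 v]
  exact pvG_exists_iff_mem stones v

lemma pvCntList_pairwise (stones : List Int) :
    (PySem.List.sorted (PySem.Dict.keys (pvBuildDict stones)) (fun x => x) false).Pairwise (· < ·) := by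
  have hle := PySem.List.sorted_pairwise (PySem.Dict.keys (pvBuildDict stones)) (fun x => x)
  have hnd : (PySem.List.sorted (PySem.Dict.keys (pvBuildDict stones)) (fun x => x) false).Nodup := by
    have hperm := PySem.List.sorted_perm (PySem.Dict.keys (pvBuildDict stones)) (fun x => x) false
    exact hperm.nodup_iff.mpr (pvBuild_inv stones stones.length (le_refl _)).2.2.1
  exact (hle.and hnd).imp (fun h => lt_of_le_of_ne h.1 h.2)

-- ---- A side: the main sweep ----

lemma pvMainLoop_spec (stones : List Int) (k : Int)
    (d : PySem.Dict Int (List Int))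
    (Hd : ∀ c x, x ∈ d.getD c [] ↔ (0 ≤ x ∧ x < (stones.length : Int) ∧ pvG stones x = c))
    (cstar : Int) (hans : pvIsAns stones k cstar) :
    ∀ (cs pre : List Int) (dead : PySem.Set Int),
      (pre ++ cs).Pairwise (· < ·) →
      (∀ v, v ∈ pre ++ cs ↔ v ∈ stones) →
      dead.Nodup →
      (∀ x, x ∈ dead ↔ (0 ≤ x ∧ x < (stones.length : Int) ∧ pvG stones x ∈ pre)) →
      cstar ∈ cs →
      pvMainLoop k d cs dead = some cstar := by
  intro cs
  induction cs with
  | nil => intro pre dead _ _ _ _ hc; exact absurd hc (List.not_mem_nil)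
  | cons c rest ih =>
    intro pre dead h1 h2 h3 h4 hc
    simp only [pvMainLoop]
    set idxs := d.getD c [] with hidxs
    set dead' := PySem.Set.update dead idxs with hdead'
    have hd'nodup : dead'.Nodup := PySem.Set.nodup_update dead idxs h3
    have hd'mem : ∀ x, x ∈ dead' ↔
        (0 ≤ x ∧ x < (stones.length : Int) ∧ (pvG stones x ∈ pre ∨ pvG stones x = c)) := by
      intro x
      rw [hdead', PySem.Set.mem_update, h4, hidxs, Hd]
      constructor
      · rintro (⟨u1, u2, u3⟩ | ⟨u1, u2, u3⟩)
        · exact ⟨u1, u2, Or.inl u3⟩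
        · exact ⟨u1, u2, Or.inr u3⟩
      · rintro ⟨u1, u2, u3 | u3⟩
        · exact Or.inl ⟨u1, u2, u3⟩
        · exact Or.inr ⟨u1, u2, u3⟩
    have hpre_lt : ∀ p ∈ pre, p < c := by
      intro p hp
      have := (List.pairwise_append.mp h1).2.2
      exact this p hp c (List.mem_cons_self)
    have hrest_gt : ∀ r ∈ rest, c < r := by
      have := List.pairwise_cons.mp (List.pairwise_append.mp h1).2.1
      exact fun r hr => this.1 r hr
    by_cases hcc : c = cstar
    · -- the answer's stage: the scan succeeds
      subst hcc
      by_cases hk1 : 1 ≤ k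
      case neg =>
        -- degenerate k ≤ 0: the guard passes and any scanned index has tmp_cnt = 1 ≥ k
        have hguard : ¬ ((dead'.length : Int) < k) := by
          have : (0:Int) ≤ (dead'.length : Int) := Int.natCast_nonneg _
          omega
        have hscan : pvInnerScan k dead' idxs = true := by
          obtain ⟨x, hx0, hxn, hxv⟩ := (pvG_exists_iff_mem stones c).mpr hans.1
          unfold pvInnerScan
          rw [List.any_eq_true]
          refine ⟨x, ?_, ?_⟩
          · rw [hidxs, Hd]; exact ⟨hx0, hxn, hxv⟩
          · rw [decide_eq_true_eq]
            have h1 := pvCountUp_nonneg dead' dead'.length (x + 1)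
            have h2 := pvCountDown_nonneg dead' dead'.length (x - 1)
            omega
        rw [if_neg (by exact_mod_cast hguard), if_pos hscan]
      case pos =>
      obtain ⟨a, ha, han, hwle, i, hia, hik, hie⟩ := pvIsAns_hit stones k c hk1 hans
      have hwin : ∀ j : Int, a ≤ j → j < a + k → j ∈ dead' := by
        intro j hj1 hj2
        rw [hd'mem]
        refine ⟨by omega, by omega, ?_⟩
        have hvmem : pvG stones j ∈ pre ++ c :: rest := (h2 _).mpr (pvG_mem stones j (by omega) (by omega))
        have hvle : pvG stones j ≤ c := hwle j hj1 hj2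
        rcases List.mem_append.mp hvmem with h | h
        · exact Or.inl h
        · rcases List.mem_cons.mp h with h | h
          · exact Or.inr h
          · exact absurd hvle (by have := hrest_gt _ h; omega)
      have hguard : ¬ ((dead'.length : Int) < k) := by
        have : k.toNat ≤ dead'.length := by
          apply pvRun_le_length dead' hd'nodup a
          intro s hs1 hs2
          exact hwin (a + s) (by omega) (by omega)
        omega
      have hscan : pvInnerScan k dead' idxs = true := by
        apply pvScan_hit k dead' idxs hd'nodup a hwin i ?_ hia hik hk1
        rw [hidxs, Hd]
        exact ⟨by omega, by omega, hie⟩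
      rw [if_neg (by exact_mod_cast hguard), if_pos hscan]
    · -- an earlier stage: the scan cannot succeed
      have hcrest : cstar ∈ rest := by
        rcases List.mem_cons.mp hc with h | h
        · exact absurd h.symm hcc
        · exact h
      have hclt : c < cstar := hrest_gt cstar hcrest
      have hscan : pvInnerScan k dead' idxs = false := by
        by_contra hcon
        rw [Bool.not_eq_false] at hcon
        by_cases hk1 : 1 ≤ k
        case neg =>
          -- degenerate k ≤ 0: every stone value is already "good", so no value precedes cstar
          have hGood : pvGood stones k c :=
            ⟨0, le_refl 0, by omega, by intro j hj1 hj2; exfalso; omega⟩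
          have hcstones : c ∈ stones := (h2 c).mp (by simp)
          have := hans.2.2 c hcstones hGood
          omega
        case pos =>
        have hgood : pvGood stones k c := by
          apply pvScan_found stones k c hk1 dead' idxs ?_ ?_ hcon
          · intro x hx
            obtain ⟨u1, u2, u3⟩ := (hd'mem x).mp hx
            refine ⟨u1, u2, ?_⟩
            rcases u3 with h | h
            · have := hpre_lt _ h; omega
            · omega
          · intro i hi
            rw [hd'mem]
            rw [hidxs, Hd] at hi
            exact ⟨hi.1, hi.2.1, Or.inr hi.2.2⟩
        have hcstones : c ∈ stones := (h2 c).mp (by simp)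
        have := hans.2.2 c hcstones hgood
        omega
      have hrec : pvMainLoop k d rest dead' = some cstar := by
        apply ih (pre ++ [c]) dead'
        · rw [List.append_assoc]; simpa using h1
        · intro v; rw [← h2 v]; simp
        · exact hd'nodup
        · intro x; rw [hd'mem]; simp
        · exact hcrest
      split_ifs with hg hs
      · exact hrec
      · rw [hs] at hscan; cases hscan
      · exact hrec

lemma pvL_A (stones : List Int) (k : Int) (hk2 : k ≤ (stones.length : Int))
    (cstar : Int) (hans : pvIsAns stones k cstar) : solution stones k = cstar := by
  unfold solution
  have hcs : cstar ∈ PySem.List.sorted (PySem.Dict.keys (pvBuildDict stones)) (fun x => x) false :=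
    (pvCntList_mem stones cstar).mpr hans.1
  have := pvMainLoop_spec stones k (pvBuildDict stones)
    (fun c x => pvBuildDict_getD stones c x) cstar hans
    (PySem.List.sorted (PySem.Dict.keys (pvBuildDict stones)) (fun x => x) false) []
    PySem.Set.empty
    (by simpa using pvCntList_pairwise stones)
    (by intro v; simpa using pvCntList_mem stones v)
    List.nodup_nil
    (by intro x; simp [PySem.Set.empty])
    hcs
  simp only [this]

-- ===== VERDICT (by name: the statement is the Claim_ definition above) =====
theorem solution_spec : Claim_equal_solution := by
  intro stones k _hdom hpre
  obtain ⟨hne, hk2⟩ := hpre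
  unfold Spec_solution
  by_cases hk1 : 1 ≤ k
  · exact pvL_A stones k hk2 _ (pvL_B stones k hk1 hk2)
  · exact pvL_A stones k hk2 _ (pvL_B0 stones k (by omega) hne)
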